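-- pv_equiv track=rewrite | github.com/dhruvk1432/NFP_Predictor | Train/branch_target_selection.py | partition_feature_columns
-- ===== SOURCE A (Python) =====
-- from typing import Dict, List, Optional, Sequence, Tuple
--
-- TARGET_PREFIXES = ("nfp_nsa_", "nfp_sa_")
--
-- CALENDAR_PREFIXES = ("is_", "month_", "quarter_", "weeks_")
--
-- REVISION_PREFIXES = ("rev_master_", "rev_")
--
-- CALENDAR_EXACT = {"year", "snapshot_date"}
--
-- def partition_feature_columns(
--     feature_cols: Sequence[str],
--     target_type: str,
-- ) -> Dict[str, List[str]]:
--     """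
--     Split feature columns into logical groups for branch training.
--
--     Args:
--         feature_cols: Iterable of feature names.
--         target_type: ``'nsa'`` or ``'sa'``.
--
--     Returns:
--         Dict with keys:
--             - ``snapshot_features``
--             - ``target_branch_features`` (nfp_{target_type}_*)
--             - ``other_target_features`` (cross-target nfp_* features)
--             - ``calendar_features``
--             - ``revision_features``
--     """
--     target_type = target_type.lower()
--     if target_type not in ("nsa", "sa"):
--         raise ValueError(f"Invalid target_type: {target_type!r}. Expected 'nsa' or 'sa'.")
--
--     branch_prefix = f"nfp_{target_type}_"
--     out = {
--         "snapshot_features": [],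
--         "target_branch_features": [],
--         "other_target_features": [],
--         "calendar_features": [],
--         "revision_features": [],
--     }
--
--     for col in feature_cols:
--         if col.startswith(branch_prefix):
--             out["target_branch_features"].append(col)
--         elif col.startswith(TARGET_PREFIXES):
--             out["other_target_features"].append(col)
--         elif col.startswith(REVISION_PREFIXES):
--             out["revision_features"].append(col)
--         elif col in CALENDAR_EXACT or col.startswith(CALENDAR_PREFIXES):
--             out["calendar_features"].append(col)
--         else:
--             out["snapshot_features"].append(col)
--
--     return out
-- ===== SOURCE B (Python) =====
-- from typing import Dict, List, Sequence
--
-- TARGET_PREFIXES = ("nfp_nsa_", "nfp_sa_")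
-- CALENDAR_PREFIXES = ("is_", "month_", "quarter_", "weeks_")
-- REVISION_PREFIXES = ("rev_master_", "rev_")
-- CALENDAR_EXACT = {"year", "snapshot_date"}
--
-- def partition_feature_columns(
--     feature_cols: Sequence[str],
--     target_type: str,
-- ) -> Dict[str, List[str]]:
--     target_type = target_type.lower()
--     if target_type not in ("nsa", "sa"):
--         raise ValueError(f"Invalid target_type: {target_type!r}. Expected 'nsa' or 'sa'.")
--     branch_prefix = f"nfp_{target_type}_"
--     is_branch = lambda c: c.startswith(branch_prefix)
--     is_other = lambda c: c.startswith(TARGET_PREFIXES) and not is_branch(c)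
--     is_rev = lambda c: c.startswith(REVISION_PREFIXES)
--     is_cal = lambda c: c in CALENDAR_EXACT or c.startswith(CALENDAR_PREFIXES)
--     return {
--         "snapshot_features": [c for c in feature_cols
--                               if not (is_branch(c) or is_other(c) or is_rev(c) or is_cal(c))],
--         "target_branch_features": [c for c in feature_cols if is_branch(c)],
--         "other_target_features": [c for c in feature_cols if is_other(c)],
--         "calendar_features": [c for c in feature_cols if is_cal(c)],
--         "revision_features": [c for c in feature_cols if is_rev(c)],
--     }
-- ===== Notes on version B (the rewrite author's own statement) =====
-- stated objective: idiomatic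
-- what changed: Replaces the single dispatch loop with per-group list comprehensions: each output group is computed by its own filter over feature_cols (snapshot as the complement of the four predicates), relying on the provable disjointness of the prefix families instead of first-match elif order.
import Mathlib
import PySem

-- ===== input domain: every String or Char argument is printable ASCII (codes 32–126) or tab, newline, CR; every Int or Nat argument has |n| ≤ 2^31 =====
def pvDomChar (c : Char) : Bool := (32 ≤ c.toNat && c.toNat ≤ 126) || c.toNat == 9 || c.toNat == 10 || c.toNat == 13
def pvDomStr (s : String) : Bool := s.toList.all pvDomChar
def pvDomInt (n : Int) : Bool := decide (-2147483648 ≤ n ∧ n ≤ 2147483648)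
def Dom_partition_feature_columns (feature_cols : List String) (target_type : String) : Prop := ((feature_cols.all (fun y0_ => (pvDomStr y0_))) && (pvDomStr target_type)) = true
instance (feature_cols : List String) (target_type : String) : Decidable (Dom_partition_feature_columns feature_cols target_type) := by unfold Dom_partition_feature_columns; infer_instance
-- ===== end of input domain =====

-- B replaces A's single first-match dispatch loop by five independent filters (per-group
-- comprehensions), snapshot being the complement of the other four predicates (objective: idiomatic).

-- shared predicates (= the module constants / startswith tests both Pythons use)
def pvBranch (bp c : String) : Bool := PySem.Str.startswith c bp
def pvTarget (c : String) : Bool := PySem.Str.startswith c "nfp_nsa_" || PySem.Str.startswith c "nfp_sa_"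
def pvRev (c : String) : Bool := PySem.Str.startswith c "rev_master_" || PySem.Str.startswith c "rev_"
def pvCal (c : String) : Bool := (c == "year" || c == "snapshot_date") ||
  (PySem.Str.startswith c "is_" || PySem.Str.startswith c "month_" ||
   PySem.Str.startswith c "quarter_" || PySem.Str.startswith c "weeks_")

-- ===== PORT A =====
-- A's loop body: first-match dispatch appending to one of the five accumulators
def pfcStep (bp : String)
    (acc : List String × List String × List String × List String × List String)
    (col : String) : List String × List String × List String × List String × List String :=
  if pvBranch bp col then (acc.1, acc.2.1 ++ [col], acc.2.2.1, acc.2.2.2.1, acc.2.2.2.2)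
  else if pvTarget col then (acc.1, acc.2.1, acc.2.2.1 ++ [col], acc.2.2.2.1, acc.2.2.2.2)
  else if pvRev col then (acc.1, acc.2.1, acc.2.2.1, acc.2.2.2.1, acc.2.2.2.2 ++ [col])
  else if pvCal col then (acc.1, acc.2.1, acc.2.2.1, acc.2.2.2.1 ++ [col], acc.2.2.2.2)
  else (acc.1 ++ [col], acc.2.1, acc.2.2.1, acc.2.2.2.1, acc.2.2.2.2)

-- outside Pre_ the Python raises ValueError; the port's value there is not claimed
def partition_feature_columns (feature_cols : List String) (target_type : String) : List (String × List String) :=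
  let t := PySem.Str.lower target_type
  let bp := "nfp_" ++ t ++ "_"
  let r := feature_cols.foldl (pfcStep bp) ([], [], [], [], [])
  [("snapshot_features", r.1), ("target_branch_features", r.2.1),
   ("other_target_features", r.2.2.1), ("calendar_features", r.2.2.2.1),
   ("revision_features", r.2.2.2.2)]

-- ===== PORT B =====
def partition_feature_columns_alt (feature_cols : List String) (target_type : String) : List (String × List String) :=
  let t := PySem.Str.lower target_type
  let bp := "nfp_" ++ t ++ "_"
  [("snapshot_features", feature_cols.filter (fun c =>
      !(pvBranch bp c || (pvTarget c && !pvBranch bp c) || pvRev c || pvCal c))),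
   ("target_branch_features", feature_cols.filter (fun c => pvBranch bp c)),
   ("other_target_features", feature_cols.filter (fun c => pvTarget c && !pvBranch bp c)),
   ("calendar_features", feature_cols.filter (fun c => pvCal c)),
   ("revision_features", feature_cols.filter (fun c => pvRev c))]

-- ===== PRECONDITION & SPEC =====
-- Pre_ excludes exactly the inputs where A raises ValueError (target_type.lower() not 'nsa'/'sa')
def Pre_partition_feature_columns (feature_cols : List String) (target_type : String) : Prop :=
  PySem.Str.lower target_type = "nsa" ∨ PySem.Str.lower target_type = "sa"
instance (feature_cols : List String) (target_type : String) : Decidable (Pre_partition_feature_columns feature_cols target_type) := by unfold Pre_partition_feature_columns; infer_instance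
def pvWitness_partition_feature_columns : List String × String :=
  (["nfp_nsa_jobs", "rev_master_x", "year", "foo"], "NSA")

def Spec_partition_feature_columns (feature_cols : List String) (target_type : String) (out : List (String × List String)) : Prop := out = partition_feature_columns_alt feature_cols target_type
instance (feature_cols : List String) (target_type : String) (out : List (String × List String)) : Decidable (Spec_partition_feature_columns feature_cols target_type out) := by unfold Spec_partition_feature_columns; infer_instance

-- ===== CLAIM (what is proved, stated in full; the proofs are below) =====
def Claim_equal_partition_feature_columns : Prop := ∀ (feature_cols : List String) (target_type : String), Dom_partition_feature_columns feature_cols target_type → Pre_partition_feature_columns feature_cols target_type → Spec_partition_feature_columns feature_cols target_type (partition_feature_columns feature_cols target_type)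

-- ===== LEMMAS AND PROOFS =====

-- A's foldl computes, in each component, the filter by the corresponding guarded predicate
theorem foldl_pfcStep (bp : String) (l : List String)
    (s b o c r : List String) :
    l.foldl (pfcStep bp) (s, b, o, c, r) =
      (s ++ l.filter (fun x => !pvBranch bp x && !pvTarget x && !pvRev x && !pvCal x),
       b ++ l.filter (fun x => pvBranch bp x),
       o ++ l.filter (fun x => !pvBranch bp x && pvTarget x),
       c ++ l.filter (fun x => !pvBranch bp x && !pvTarget x && !pvRev x && pvCal x),
       r ++ l.filter (fun x => !pvBranch bp x && !pvTarget x && pvRev x)) := by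
  induction l generalizing s b o c r with
  | nil => simp
  | cons x xs ih =>
    by_cases h1 : pvBranch bp x = true
    · simp [List.foldl_cons, pfcStep, h1, ih]
    · rw [Bool.not_eq_true] at h1
      by_cases h2 : pvTarget x = true
      · simp [List.foldl_cons, pfcStep, h1, h2, ih]
      · rw [Bool.not_eq_true] at h2
        by_cases h3 : pvRev x = true
        · simp [List.foldl_cons, pfcStep, h1, h2, h3, ih]
        · rw [Bool.not_eq_true] at h3
          by_cases h4 : pvCal x = true
          · simp [List.foldl_cons, pfcStep, h1, h2, h3, h4, ih]
          · rw [Bool.not_eq_true] at h4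
            simp [List.foldl_cons, pfcStep, h1, h2, h3, h4, ih]

theorem sw_head (s p : List Char) (c : Char) (hp : p.head? = some c)
    (h : PySem.Chars.startswith s p = true) : s.head? = some c := by
  rw [PySem.Chars.startswith_iff] at h
  obtain ⟨t, rfl⟩ := h
  cases p with
  | nil => simp at hp
  | cons a p' => simp at hp ⊢; simpa using hp

theorem head_of_pvRev (x : String) (h : pvRev x = true) : x.toList.head? = some 'r' := by
  unfold pvRev at h
  rw [Bool.or_eq_true] at h
  rcases h with h | h <;> simp only [PySem.Str.startswith_eq] at h
  · exact sw_head _ _ _ (by decide) h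
  · exact sw_head _ _ _ (by decide) h

theorem head_of_pvTarget (x : String) (h : pvTarget x = true) : x.toList.head? = some 'n' := by
  unfold pvTarget at h
  rw [Bool.or_eq_true] at h
  rcases h with h | h <;> simp only [PySem.Str.startswith_eq] at h
  · exact sw_head _ _ _ (by decide) h
  · exact sw_head _ _ _ (by decide) h

-- branch prefix is "nfp_nsa_" or "nfp_sa_" under Pre_; both start with 'n'
theorem head_of_pvBranch (bp x : String) (hbp : bp = "nfp_nsa_" ∨ bp = "nfp_sa_")
    (h : pvBranch bp x = true) : x.toList.head? = some 'n' := by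
  unfold pvBranch at h
  rw [PySem.Str.startswith_eq] at h
  rcases hbp with rfl | rfl
  · exact sw_head _ _ _ (by decide) h
  · exact sw_head _ _ _ (by decide) h

theorem head_of_pvCal (x : String) (h : pvCal x = true) :
    x.toList.head? = some 'y' ∨ x.toList.head? = some 's' ∨ x.toList.head? = some 'i' ∨
    x.toList.head? = some 'm' ∨ x.toList.head? = some 'q' ∨ x.toList.head? = some 'w' := by
  unfold pvCal at h
  rw [Bool.or_eq_true, Bool.or_eq_true, Bool.or_eq_true, Bool.or_eq_true, Bool.or_eq_true] at h
  rcases h with (h | h) | (((h | h) | h) | h)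
  · left; rw [beq_iff_eq] at h; subst h; decide
  · right; left; rw [beq_iff_eq] at h; subst h; decide
  · right; right; left
    rw [PySem.Str.startswith_eq] at h; exact sw_head _ _ _ (by decide) h
  · right; right; right; left
    rw [PySem.Str.startswith_eq] at h; exact sw_head _ _ _ (by decide) h
  · right; right; right; right; left
    rw [PySem.Str.startswith_eq] at h; exact sw_head _ _ _ (by decide) h
  · right; right; right; right; right
    rw [PySem.Str.startswith_eq] at h; exact sw_head _ _ _ (by decide) h

theorem pvRev_disj (bp x : String) (hbp : bp = "nfp_nsa_" ∨ bp = "nfp_sa_")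
    (h : pvRev x = true) : pvBranch bp x = false ∧ pvTarget x = false := by
  have hr := head_of_pvRev x h
  constructor
  · by_contra hb
    rw [Bool.not_eq_false] at hb
    have := head_of_pvBranch bp x hbp hb
    rw [hr] at this; simp at this
  · by_contra ht
    rw [Bool.not_eq_false] at ht
    have := head_of_pvTarget x ht
    rw [hr] at this; simp at this

theorem pvCal_disj (bp x : String) (hbp : bp = "nfp_nsa_" ∨ bp = "nfp_sa_")
    (h : pvCal x = true) : pvBranch bp x = false ∧ pvTarget x = false ∧ pvRev x = false := by
  have hc := head_of_pvCal x h
  refine ⟨?_, ?_, ?_⟩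
  · by_contra hb
    rw [Bool.not_eq_false] at hb
    have := head_of_pvBranch bp x hbp hb
    rcases hc with h' | h' | h' | h' | h' | h' <;> rw [h'] at this <;> simp at this
  · by_contra ht
    rw [Bool.not_eq_false] at ht
    have := head_of_pvTarget x ht
    rcases hc with h' | h' | h' | h' | h' | h' <;> rw [h'] at this <;> simp at this
  · by_contra hr
    rw [Bool.not_eq_false] at hr
    have := head_of_pvRev x hr
    rcases hc with h' | h' | h' | h' | h' | h' <;> rw [h'] at this <;> simp at this

-- the guarded predicates A's elif-order produces coincide with B's unguarded ones
theorem rev_filter_eq (bp x : String) (hbp : bp = "nfp_nsa_" ∨ bp = "nfp_sa_") :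
    (!pvBranch bp x && !pvTarget x && pvRev x) = pvRev x := by
  by_cases h : pvRev x = true
  · obtain ⟨hb, ht⟩ := pvRev_disj bp x hbp h
    simp [h, hb, ht]
  · rw [Bool.not_eq_true] at h; simp [h]

theorem cal_filter_eq (bp x : String) (hbp : bp = "nfp_nsa_" ∨ bp = "nfp_sa_") :
    (!pvBranch bp x && !pvTarget x && !pvRev x && pvCal x) = pvCal x := by
  by_cases h : pvCal x = true
  · obtain ⟨hb, ht, hr⟩ := pvCal_disj bp x hbp h
    simp [h, hb, ht, hr]
  · rw [Bool.not_eq_true] at h; simp [h]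

theorem snap_filter_eq (bp x : String) :
    (!pvBranch bp x && !pvTarget x && !pvRev x && !pvCal x) =
      (!(pvBranch bp x || (pvTarget x && !pvBranch bp x) || pvRev x || pvCal x)) := by
  cases pvBranch bp x <;> cases pvTarget x <;> cases pvRev x <;> cases pvCal x <;> rfl

theorem other_filter_eq (bp x : String) :
    (!pvBranch bp x && pvTarget x) = (pvTarget x && !pvBranch bp x) := Bool.and_comm _ _

-- ===== VERDICT (by name: the statement is the Claim_ definition above) =====
theorem partition_feature_columns_spec : Claim_equal_partition_feature_columns := by
  intro fc tt _ hpre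
  unfold Spec_partition_feature_columns
  simp only [partition_feature_columns, partition_feature_columns_alt]
  have hbp : "nfp_" ++ PySem.Str.lower tt ++ "_" = "nfp_nsa_" ∨
             "nfp_" ++ PySem.Str.lower tt ++ "_" = "nfp_sa_" := by
    rcases hpre with h | h <;> rw [h]
    · left; rfl
    · right; rfl
  set bp := "nfp_" ++ PySem.Str.lower tt ++ "_" with hbpdef
  rw [foldl_pfcStep]
  simp only [List.nil_append]
  refine congrArg₂ _ (congrArg _ ?_) (congrArg₂ _ rfl (congrArg₂ _ (congrArg _ ?_)
    (congrArg₂ _ (congrArg _ ?_) (congrArg₂ _ (congrArg _ ?_) rfl))))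
  · exact List.filter_congr (fun x _ => snap_filter_eq bp x)
  · exact List.filter_congr (fun x _ => other_filter_eq bp x)
  · exact List.filter_congr (fun x _ => cal_filter_eq bp x hbp)
  · exact List.filter_congr (fun x _ => rev_filter_eq bp x hbp)
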